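-- pv_equiv track=rewrite | github.com/jokken79/YuKyuDATA-app1.0v | YukyuData-AppFusion2.13/backend/middleware/rate_limiter.py | _get_endpoint_key
-- ===== SOURCE A (Python) =====
-- from typing import Dict, Tuple, Optional, Any
--
-- RATE_LIMITS = {
--     # Default limits
--     'default': {'requests': 100, 'window': 60},           # 100 req/min para anónimos
--     'authenticated': {'requests': 200, 'window': 60},     # 200 req/min para autenticados
--
--     # Auth endpoints - muy restrictivos (prevenir brute force)
--     'api/auth/login': {'requests': 5, 'window': 60},      # 5 intentos/min
--     'api/auth/register': {'requests': 3, 'window': 60},   # 3 registros/min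
--     'api/auth/refresh': {'requests': 10, 'window': 60},   # 10 refresh/min
--     'api/auth/change-password': {'requests': 3, 'window': 60},
--
--     # Sync endpoints - muy limitados (operaciones costosas)
--     'api/sync': {'requests': 2, 'window': 60},            # 2 syncs/min
--     'api/sync-genzai': {'requests': 2, 'window': 60},
--     'api/sync-ukeoi': {'requests': 2, 'window': 60},
--     'api/sync-staff': {'requests': 2, 'window': 60},
--
--     # Leave requests - moderado
--     'api/leave-requests': {'requests': 30, 'window': 60},
--
--     # Employees - moderado
--     'api/employees': {'requests': 50, 'window': 60},
--
--     # Reports - limitado (generación costosa)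
--     'api/reports': {'requests': 10, 'window': 60},
--     'api/reports/pdf': {'requests': 5, 'window': 60},
--
--     # Notifications - relajado
--     'api/notifications': {'requests': 100, 'window': 60},
--
--     # Health/status - muy relajado
--     'api/health': {'requests': 300, 'window': 60},
--     'api/project-status': {'requests': 60, 'window': 60},
--
--     # Analytics - moderado
--     'api/analytics': {'requests': 30, 'window': 60},
--
--     # Compliance checks
--     'api/compliance': {'requests': 20, 'window': 60},
--     'api/expiring-soon': {'requests': 20, 'window': 60},
--
--     # ✅ FIX (BUG #16-18): Rate limiting en endpoints sensibles
--     # Yukyu endpoints - limitado (acceso a datos de vacaciones sensibles)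
--     'yukyu/usage-details': {'requests': 20, 'window': 60},       # 20 req/min
--     'yukyu/monthly-summary': {'requests': 15, 'window': 60},
--     'yukyu/kpi-stats': {'requests': 15, 'window': 60},
--     'yukyu/by-employee-type': {'requests': 15, 'window': 60},
--     'yukyu/employee-summary': {'requests': 20, 'window': 60},
--
--     # System & Audit endpoints - muy restrictivos (acceso a logs sensibles)
--     'cache-stats': {'requests': 10, 'window': 60},               # 10 req/min
--     'audit-log': {'requests': 15, 'window': 60},                 # 15 req/min para listado
--     'orchestrator/status': {'requests': 20, 'window': 60},       # 20 req/min para status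
--     'orchestrator/history': {'requests': 10, 'window': 60},      # 10 req/min
--     'orchestrator/run-compliance-check': {'requests': 5, 'window': 60},  # 5 req/min
--     'system/snapshot': {'requests': 10, 'window': 60},
--     'system/audit-log': {'requests': 15, 'window': 60},
--     'system/activity-report': {'requests': 5, 'window': 60},
-- }
--
-- def _get_endpoint_key(path: str) -> Optional[str]:
--     """
--     Obtener la clave de configuración del endpoint.
--
--     Busca coincidencias exactas primero, luego prefijos.
--     """
--     # Normalizar path
--     path = path.lstrip('/')
--
--     # Coincidencia exacta
--     if path in RATE_LIMITS:
--         return path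
--
--     # Buscar por prefijo (más largo primero)
--     matches = []
--     for endpoint_key in RATE_LIMITS.keys():
--         if endpoint_key.startswith('api/') and path.startswith(endpoint_key):
--             matches.append(endpoint_key)
--
--     if matches:
--         # Retornar el match más específico (más largo)
--         return max(matches, key=len)
--
--     return None
-- ===== SOURCE B (Python) =====
-- from typing import Optional
--
-- # Lookup tables enumerating the RATE_LIMITS keys: the full key set for the exact
-- # match, and the 'api/'-prefixed keys listed longest-first (so the first prefix
-- # hit is the most specific one).
-- _EXACT_KEYS = frozenset((
--     'default',
--     'authenticated',
--     'api/auth/login',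
--     'api/auth/register',
--     'api/auth/refresh',
--     'api/auth/change-password',
--     'api/sync',
--     'api/sync-genzai',
--     'api/sync-ukeoi',
--     'api/sync-staff',
--     'api/leave-requests',
--     'api/employees',
--     'api/reports',
--     'api/reports/pdf',
--     'api/notifications',
--     'api/health',
--     'api/project-status',
--     'api/analytics',
--     'api/compliance',
--     'api/expiring-soon',
--     'yukyu/usage-details',
--     'yukyu/monthly-summary',
--     'yukyu/kpi-stats',
--     'yukyu/by-employee-type',
--     'yukyu/employee-summary',
--     'cache-stats',
--     'audit-log',
--     'orchestrator/status',
--     'orchestrator/history',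
--     'orchestrator/run-compliance-check',
--     'system/snapshot',
--     'system/audit-log',
--     'system/activity-report',
-- ))
--
-- _API_KEYS_BY_LEN = (
--     'api/auth/change-password',
--     'api/leave-requests',
--     'api/project-status',
--     'api/auth/register',
--     'api/notifications',
--     'api/expiring-soon',
--     'api/auth/refresh',
--     'api/sync-genzai',
--     'api/reports/pdf',
--     'api/auth/login',
--     'api/sync-ukeoi',
--     'api/sync-staff',
--     'api/compliance',
--     'api/employees',
--     'api/analytics',
--     'api/reports',
--     'api/health',
--     'api/sync',
-- )
--
--
-- def _get_endpoint_key(path: str) -> Optional[str]: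
--     """Exact key if present; else the first (longest) 'api/' key prefixing the path."""
--     p = path.lstrip('/')
--     if p in _EXACT_KEYS:
--         return p
--     for key in _API_KEYS_BY_LEN:
--         if p.startswith(key):
--             return key
--     return None
-- ===== Notes on version B (the rewrite author's own statement) =====
-- stated objective: alternative
-- what changed: Replaces A's dict scan that collects all matching api/ keys and takes max(key=len) with a table-driven matcher: a precomputed key set for the exact match and a precomputed tuple of the api/ keys listed longest-first, scanned with early return at the first prefix hit.
import Mathlib
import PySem

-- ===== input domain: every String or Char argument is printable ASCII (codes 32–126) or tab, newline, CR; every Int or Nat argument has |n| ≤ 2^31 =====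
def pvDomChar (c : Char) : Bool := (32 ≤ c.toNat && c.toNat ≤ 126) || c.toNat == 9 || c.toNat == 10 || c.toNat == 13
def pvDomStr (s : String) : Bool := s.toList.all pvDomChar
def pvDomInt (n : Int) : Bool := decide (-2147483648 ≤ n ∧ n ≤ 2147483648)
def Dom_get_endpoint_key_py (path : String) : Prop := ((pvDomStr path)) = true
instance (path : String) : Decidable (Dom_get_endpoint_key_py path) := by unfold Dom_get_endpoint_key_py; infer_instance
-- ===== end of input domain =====

-- B replaces A's collect-all-then-max(key=len) dict scan with a table-driven matcher
-- (precomputed key set + api/ keys listed longest-first, early return); same result.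

-- ===== PORT A =====
-- Module constant RATE_LIMITS (A's code iterates this dict).
def pvRATE_LIMITS : PySem.Dict String (PySem.Dict String Int) :=
  PySem.Dict.ofList [
    ("default", PySem.Dict.ofList [("requests", 100), ("window", 60)]),
    ("authenticated", PySem.Dict.ofList [("requests", 200), ("window", 60)]),
    ("api/auth/login", PySem.Dict.ofList [("requests", 5), ("window", 60)]),
    ("api/auth/register", PySem.Dict.ofList [("requests", 3), ("window", 60)]),
    ("api/auth/refresh", PySem.Dict.ofList [("requests", 10), ("window", 60)]),
    ("api/auth/change-password", PySem.Dict.ofList [("requests", 3), ("window", 60)]),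
    ("api/sync", PySem.Dict.ofList [("requests", 2), ("window", 60)]),
    ("api/sync-genzai", PySem.Dict.ofList [("requests", 2), ("window", 60)]),
    ("api/sync-ukeoi", PySem.Dict.ofList [("requests", 2), ("window", 60)]),
    ("api/sync-staff", PySem.Dict.ofList [("requests", 2), ("window", 60)]),
    ("api/leave-requests", PySem.Dict.ofList [("requests", 30), ("window", 60)]),
    ("api/employees", PySem.Dict.ofList [("requests", 50), ("window", 60)]),
    ("api/reports", PySem.Dict.ofList [("requests", 10), ("window", 60)]),
    ("api/reports/pdf", PySem.Dict.ofList [("requests", 5), ("window", 60)]),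
    ("api/notifications", PySem.Dict.ofList [("requests", 100), ("window", 60)]),
    ("api/health", PySem.Dict.ofList [("requests", 300), ("window", 60)]),
    ("api/project-status", PySem.Dict.ofList [("requests", 60), ("window", 60)]),
    ("api/analytics", PySem.Dict.ofList [("requests", 30), ("window", 60)]),
    ("api/compliance", PySem.Dict.ofList [("requests", 20), ("window", 60)]),
    ("api/expiring-soon", PySem.Dict.ofList [("requests", 20), ("window", 60)]),
    ("yukyu/usage-details", PySem.Dict.ofList [("requests", 20), ("window", 60)]),
    ("yukyu/monthly-summary", PySem.Dict.ofList [("requests", 15), ("window", 60)]),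
    ("yukyu/kpi-stats", PySem.Dict.ofList [("requests", 15), ("window", 60)]),
    ("yukyu/by-employee-type", PySem.Dict.ofList [("requests", 15), ("window", 60)]),
    ("yukyu/employee-summary", PySem.Dict.ofList [("requests", 20), ("window", 60)]),
    ("cache-stats", PySem.Dict.ofList [("requests", 10), ("window", 60)]),
    ("audit-log", PySem.Dict.ofList [("requests", 15), ("window", 60)]),
    ("orchestrator/status", PySem.Dict.ofList [("requests", 20), ("window", 60)]),
    ("orchestrator/history", PySem.Dict.ofList [("requests", 10), ("window", 60)]),
    ("orchestrator/run-compliance-check", PySem.Dict.ofList [("requests", 5), ("window", 60)]),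
    ("system/snapshot", PySem.Dict.ofList [("requests", 10), ("window", 60)]),
    ("system/audit-log", PySem.Dict.ofList [("requests", 15), ("window", 60)]),
    ("system/activity-report", PySem.Dict.ofList [("requests", 5), ("window", 60)])]

def get_endpoint_key_py (path : String) : Option String :=
  -- path = path.lstrip('/')  (exact: drops the leading '/' characters)
  let path : String := String.ofList (path.toList.dropWhile (· == '/'))
  -- if path in RATE_LIMITS: return path
  if pvRATE_LIMITS.contains path then some path
  else
    -- ms = []; for endpoint_key in RATE_LIMITS.keys(): if …: ms.append(endpoint_key)
    let ms : List String := (PySem.Dict.keys pvRATE_LIMITS).foldl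
      (fun acc k =>
        if PySem.Str.startswith k "api/" && PySem.Str.startswith path k then acc ++ [k] else acc) []
    -- if ms: return max(ms, key=len)  /  return None
    if ms ≠ [] then PySem.List.max? ms PySem.Str.len else none

-- ===== PORT B =====
-- _EXACT_KEYS = frozenset((…))  — all RATE_LIMITS keys
def pvExactKeys : PySem.Set String :=
  PySem.Set.ofList ["default", "authenticated", "api/auth/login", "api/auth/register",
    "api/auth/refresh", "api/auth/change-password", "api/sync", "api/sync-genzai",
    "api/sync-ukeoi", "api/sync-staff", "api/leave-requests", "api/employees",
    "api/reports", "api/reports/pdf", "api/notifications", "api/health",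
    "api/project-status", "api/analytics", "api/compliance", "api/expiring-soon",
    "yukyu/usage-details", "yukyu/monthly-summary", "yukyu/kpi-stats",
    "yukyu/by-employee-type", "yukyu/employee-summary", "cache-stats", "audit-log",
    "orchestrator/status", "orchestrator/history", "orchestrator/run-compliance-check",
    "system/snapshot", "system/audit-log", "system/activity-report"]

-- _API_KEYS_BY_LEN = (…)  — the 'api/' keys, longest first
def pvApiKeysByLen : List String :=
  ["api/auth/change-password", "api/leave-requests", "api/project-status",
   "api/auth/register", "api/notifications", "api/expiring-soon", "api/auth/refresh",
   "api/sync-genzai", "api/reports/pdf", "api/auth/login", "api/sync-ukeoi",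
   "api/sync-staff", "api/compliance", "api/employees", "api/analytics",
   "api/reports", "api/health", "api/sync"]

-- for key in rules: if p.startswith(key): return key  /  return None
def pvScanPrefix (p : String) : List String → Option String
  | [] => none
  | k :: rest => if PySem.Str.startswith p k then some k else pvScanPrefix p rest

def get_endpoint_key_py_alt (path : String) : Option String :=
  let p : String := String.ofList (path.toList.dropWhile (· == '/'))
  if pvExactKeys.contains p then some p
  else pvScanPrefix p pvApiKeysByLen

-- ===== PRECONDITION & SPEC =====
def Spec_get_endpoint_key_py (path : String) (out : Option String) : Prop := out = get_endpoint_key_py_alt path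
instance (path : String) (out : Option String) : Decidable (Spec_get_endpoint_key_py path out) := by unfold Spec_get_endpoint_key_py; infer_instance

-- ===== CLAIM =====
def Claim_equal_get_endpoint_key_py : Prop := ∀ (path : String), Dom_get_endpoint_key_py path → Spec_get_endpoint_key_py path (get_endpoint_key_py path)

-- ===== LEMMAS AND PROOFS =====

-- B's literal key set is exactly RATE_LIMITS' key list.
theorem pv_exact_keys_eq : pvExactKeys = PySem.Dict.keys pvRATE_LIMITS := by decide

-- B's literal prefix table is exactly the api/ keys of RATE_LIMITS sorted by descending length (stable).
theorem pv_api_keys_eq :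
    pvApiKeysByLen = PySem.List.sorted
      ((PySem.Dict.keys pvRATE_LIMITS).filter (fun k => PySem.Str.startswith k "api/"))
      PySem.Str.len true := by decide

-- The scan loop is find?.
theorem pv_scan_eq_find (p : String) (l : List String) :
    pvScanPrefix p l = l.find? (fun k => PySem.Str.startswith p k) := by
  induction l with
  | nil => rfl
  | cons k rest ih =>
    simp only [pvScanPrefix]
    by_cases h : PySem.Str.startswith p k = true
    · rw [if_pos h, List.find?_cons_of_pos h]
    · rw [if_neg h, List.find?_cons_of_neg (by simpa using h), ih]

-- The running-max fold never moves off a key-maximal accumulator.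
theorem pv_foldl_max_stay {α : Type} (key : α → Int) (t : List α) (m : α)
    (h : ∀ y ∈ t, key y ≤ key m) :
    t.foldl (fun acc x => match acc with
      | none => some x
      | some m => if key m < key x then some x else some m) (some m) = some m := by
  induction t with
  | nil => rfl
  | cons a t ih =>
    have ha : ¬ key m < key a := not_lt.mpr (h a (List.mem_cons_self))
    simp only [List.foldl_cons, if_neg ha]
    exact ih (fun y hy => h y (List.mem_cons_of_mem _ hy))

-- max? of a cons whose head is key-maximal is the head (Python's max keeps the FIRST maximum).
theorem pv_max?_cons_of_max {α : Type} (key : α → Int) (x : α) (t : List α)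
    (h : ∀ y ∈ t, key y ≤ key x) : PySem.List.max? (x :: t) key = some x := by
  simp only [PySem.List.max?, List.foldl_cons]
  exact pv_foldl_max_stay key t x h

-- On a list sorted by nonincreasing key, the first match IS the first key-maximal match.
theorem pv_find_eq_max? (p : String → Bool) (l : List String)
    (h : l.Pairwise (fun a b => PySem.Str.len b ≤ PySem.Str.len a)) :
    l.find? p = PySem.List.max? (l.filter p) PySem.Str.len := by
  induction l with
  | nil => rfl
  | cons a t ih =>
    rcases List.pairwise_cons.mp h with ⟨h1, h2⟩
    by_cases hp : p a = true
    · rw [List.find?_cons_of_pos hp, List.filter_cons_of_pos hp]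
      exact (pv_max?_cons_of_max _ a _ (fun y hy => h1 y (List.mem_of_mem_filter hy))).symm
    · rw [List.find?_cons_of_neg hp, List.filter_cons_of_neg hp]
      exact ih h2

-- max? is permutation-invariant when the key is injective on the list's elements.
theorem pv_max?_perm {xs ys : List String} (hp : xs.Perm ys)
    (hu : ∀ a ∈ xs, ∀ b ∈ xs, PySem.Str.len a = PySem.Str.len b → a = b) :
    PySem.List.max? xs PySem.Str.len = PySem.List.max? ys PySem.Str.len := by
  rcases eq_or_ne xs [] with rfl | hne
  · rw [List.Perm.eq_nil hp.symm]
  · have hyne : ys ≠ [] := fun hy => hne (List.Perm.eq_nil (hy ▸ hp))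
    obtain ⟨m, hm⟩ := Option.ne_none_iff_exists'.mp
      (fun h0 => hne ((PySem.List.max?_eq_none_iff xs PySem.Str.len).mp h0))
    obtain ⟨m', hm'⟩ := Option.ne_none_iff_exists'.mp
      (fun h0 => hyne ((PySem.List.max?_eq_none_iff ys PySem.Str.len).mp h0))
    have hmx : m ∈ xs := PySem.List.max?_mem hm
    have hm'y : m' ∈ ys := PySem.List.max?_mem hm'
    have hm'x : m' ∈ xs := hp.symm.subset hm'y
    have h1 : PySem.Str.len m' ≤ PySem.Str.len m := PySem.List.max?_isMax hm m' hm'x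
    have h2 : PySem.Str.len m ≤ PySem.Str.len m' := PySem.List.max?_isMax hm' m (hp.subset hmx)
    rw [hm, hm', hu m hmx m' hm'x (le_antisymm h2 h1)]

-- Two prefixes of the same string with equal length are equal.
theorem pv_prefix_len_eq {q a b : String}
    (ha : PySem.Str.startswith q a = true) (hb : PySem.Str.startswith q b = true)
    (hl : PySem.Str.len a = PySem.Str.len b) : a = b := by
  rw [PySem.Str.startswith_eq, PySem.Chars.startswith_iff] at ha hb
  rw [PySem.Str.len_eq, PySem.Str.len_eq] at hl
  have hlen : a.toList.length = b.toList.length := by exact_mod_cast hl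
  exact String.toList_inj.mp
    ((List.prefix_of_prefix_length_le ha hb hlen.le).eq_of_length hlen)

-- ===== VERDICT =====
theorem get_endpoint_key_py_spec : Claim_equal_get_endpoint_key_py := by
  intro path _
  unfold Spec_get_endpoint_key_py get_endpoint_key_py get_endpoint_key_py_alt
  set q : String := String.ofList (path.toList.dropWhile (· == '/')) with hq
  have hcontains : pvExactKeys.contains q = pvRATE_LIMITS.contains q := by
    rw [pv_exact_keys_eq, PySem.Dict.contains_eq_decide_mem_keys]
    simp
  by_cases hc : pvRATE_LIMITS.contains q = true
  · have hm : q ∈ pvExactKeys := by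
      have hc' : pvExactKeys.contains q = true := by rw [hcontains]; exact hc
      simpa using hc'
    simp [hc, hm]
  · simp only [Bool.not_eq_true] at hc
    have hc' : pvExactKeys.contains q = false := by rw [hcontains]; exact hc
    simp only [hc, hc', Bool.false_eq_true, if_false]
    rw [PySem.List.foldl_append_if
      (fun k => PySem.Str.startswith k "api/" && PySem.Str.startswith q k) (fun k => k)]
    simp only [List.map_id', List.nil_append]
    set M : List String :=
      (PySem.Dict.keys pvRATE_LIMITS).filter (fun k => PySem.Str.startswith k "api/") with hM
    have hff : (PySem.Dict.keys pvRATE_LIMITS).filter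
        (fun k => PySem.Str.startswith k "api/" && PySem.Str.startswith q k)
        = M.filter (fun k => PySem.Str.startswith q k) := by
      rw [hM, List.filter_filter]
      exact (List.filter_congr (fun x _ => by rw [Bool.and_comm])).symm
    rw [hff]
    have hcollapse :
        (if M.filter (fun k => PySem.Str.startswith q k) ≠ [] then
          PySem.List.max? (M.filter (fun k => PySem.Str.startswith q k)) PySem.Str.len
        else none)
        = PySem.List.max? (M.filter (fun k => PySem.Str.startswith q k)) PySem.Str.len := by
      by_cases he : M.filter (fun k => PySem.Str.startswith q k) = []
      · rw [if_neg (fun h => h he), he]; rfl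
      · rw [if_pos he]
    rw [hcollapse]
    have hperm : (M.filter (fun k => PySem.Str.startswith q k)).Perm
        ((PySem.List.sorted M PySem.Str.len true).filter (fun k => PySem.Str.startswith q k)) :=
      ((PySem.List.sorted_perm M PySem.Str.len true).filter _).symm
    rw [pv_max?_perm hperm (fun a hax b hbx hl =>
      pv_prefix_len_eq (List.of_mem_filter hax) (List.of_mem_filter hbx) hl)]
    rw [pv_scan_eq_find, pv_api_keys_eq, ← hM]
    exact (pv_find_eq_max? _ _ (PySem.List.sorted_pairwise_rev M PySem.Str.len)).symm
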